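-- pv_equiv track=rewrite | github.com/wchrepo/mulfe | data/generate_specificity_triviaqa.py | reduce_aliases
-- ===== SOURCE A (Python) =====
-- def reduce_aliases(aliases):
--     aliases = sorted(aliases)
--     results = []
--     prefix = None
--     for alias in aliases:
--         if prefix is None or not alias.startswith(prefix):
--             results.append(alias)
--             prefix = alias
--     return results
-- ===== SOURCE B (Python) =====
-- def reduce_aliases(aliases):
--     uniq = set(aliases)
--     return sorted(s for s in uniq
--                   if not any(t != s and s.startswith(t) for t in uniq))
-- ===== Notes on version B (the rewrite author's own statement) =====
-- stated objective: simpler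
-- what changed: Replaces the sort-then-linear-sweep-tracking-the-last-kept-prefix with a direct all-pairs test keeping each distinct alias that no other alias is a proper prefix of, sorting only to produce the output order.
import Mathlib
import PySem

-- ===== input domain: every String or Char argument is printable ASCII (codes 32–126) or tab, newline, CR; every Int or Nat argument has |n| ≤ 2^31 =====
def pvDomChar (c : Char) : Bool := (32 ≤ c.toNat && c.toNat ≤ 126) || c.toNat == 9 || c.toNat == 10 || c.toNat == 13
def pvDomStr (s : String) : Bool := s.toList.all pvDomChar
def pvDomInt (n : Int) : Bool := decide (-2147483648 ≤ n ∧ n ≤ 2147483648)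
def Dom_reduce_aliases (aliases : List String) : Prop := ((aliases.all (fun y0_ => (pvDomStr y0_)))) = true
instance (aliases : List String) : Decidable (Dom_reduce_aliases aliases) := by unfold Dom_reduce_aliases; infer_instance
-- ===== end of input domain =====

-- B replaces A's sort-then-sweep (tracking the last kept prefix) by a direct
-- all-pairs "no other alias is a prefix of me" filter over the distinct
-- aliases, sorted at the end: simpler and more direct, not faster.

-- ===== PORT A =====
def pvStepA (st : List String × Option String) (al : String) : List String × Option String :=
  match st.2 with
  | none => (st.1 ++ [al], some al)
  | some p =>
    if ¬ (PySem.Str.startswith al p) then (st.1 ++ [al], some al)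
    else st

def reduce_aliases (aliases : List String) : List String :=
  let sortedAliases := PySem.List.sorted aliases (fun x => x) false
  (sortedAliases.foldl pvStepA ([], none)).1

-- ===== PORT B =====
def reduce_aliases_alt (aliases : List String) : List String :=
  let uniq : PySem.Set String := PySem.Set.ofList aliases
  PySem.List.sorted
    (uniq.filter (fun s => ! (uniq.any (fun t => decide (t ≠ s) && PySem.Str.startswith s t))))
    (fun x => x) false

-- ===== PRECONDITION & SPEC =====
def Spec_reduce_aliases (aliases : List String) (out : List String) : Prop := out = reduce_aliases_alt aliases
instance (aliases : List String) (out : List String) : Decidable (Spec_reduce_aliases aliases out) := by unfold Spec_reduce_aliases; infer_instance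

-- ===== CLAIM (what is proved, stated in full; the proofs are below) =====
def Claim_equal_reduce_aliases : Prop := ∀ (aliases : List String), Dom_reduce_aliases aliases → Spec_reduce_aliases aliases (reduce_aliases aliases)

-- ===== LEMMAS AND PROOFS =====

-- "no element of xs other than s itself is a prefix of s"
def pvMinIn (xs : List String) (s : String) : Prop :=
  ∀ t ∈ xs, t ≠ s → ¬ t.toList <+: s.toList

-- A's sweep, with the accumulator factored out (kept elements of the remaining list)
def pvLoopA : List String → String → List String
  | [], _ => []
  | a :: tl, p =>
    if PySem.Str.startswith a p = true then pvLoopA tl p else a :: pvLoopA tl a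

theorem pv_foldl_factor (tl : List String) (res : List String) (p : String) :
    (tl.foldl pvStepA (res, some p)).1 = res ++ pvLoopA tl p := by
  induction tl generalizing res p with
  | nil => simp [pvLoopA]
  | cons a tl ih =>
    simp only [List.foldl_cons, pvStepA, pvLoopA]
    by_cases h : PySem.Str.startswith a p = true
    · rw [if_pos h, if_neg (by simpa using h), ih]
    · rw [if_neg h, if_pos (by simpa using h), ih]
      simp

-- the < on List Char from Mathlib's LinearOrder is definitionally List.Lex (· < ·)
theorem pv_lt_of_lex {l l' : List Char} (h : List.Lex (· < ·) l l') : l < l' := h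

theorem pv_lex_of_lt {l l' : List Char} (h : l < l') : List.Lex (· < ·) l l' := h

-- a prefix of l₂ is ≤ l₂ in the lexicographic order
theorem pv_prefix_le {l₁ l₂ : List Char} (h : l₁ <+: l₂) : l₁ ≤ l₂ := by
  obtain ⟨t, rfl⟩ := h
  cases t with
  | nil => simp
  | cons c cs =>
    refine le_of_lt (pv_lt_of_lex ?_)
    induction l₁ with
    | nil => exact List.Lex.nil
    | cons a l₁ ih => exact List.Lex.cons ih

-- key lexicographic fact: if p ≤ a ≤ s and p is a prefix of s, then p is a prefix of a
theorem pv_prefix_between {p a s : List Char} (h₁ : p ≤ a) (h₂ : a ≤ s) (hp : p <+: s) :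
    p <+: a := by
  induction p generalizing a s with
  | nil => exact List.nil_prefix
  | cons c p' ih =>
    obtain ⟨t, rfl⟩ := hp
    cases a with
    | nil =>
      rcases lt_or_eq_of_le h₁ with hlt | heq
      · cases pv_lex_of_lt hlt
      · exact absurd heq (by simp)
    | cons d a' =>
      rcases lt_or_eq_of_le h₁ with hlt | heq
      · cases pv_lex_of_lt hlt with
        | cons h' =>
          -- heads equal; compare tails
          have h₂' : a' ≤ p' ++ t := by
            rcases lt_or_eq_of_le h₂ with hlt2 | heq2
            · cases pv_lex_of_lt hlt2 with
              | cons h'' => exact le_of_lt (pv_lt_of_lex h'')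
              | rel h'' => exact absurd h'' (lt_irrefl _)
            · exact le_of_eq (List.cons_eq_cons.mp heq2).2
          exact (List.cons_prefix_cons).mpr
            ⟨rfl, ih (le_of_lt (pv_lt_of_lex h')) h₂' ⟨t, rfl⟩⟩
        | rel h' =>
          -- c < d but d :: a' ≤ c :: (p' ++ t) forces d ≤ c: contradiction
          exfalso
          rcases lt_or_eq_of_le h₂ with hlt2 | heq2
          · cases pv_lex_of_lt hlt2 with
            | cons h'' => exact absurd h' (lt_irrefl _)
            | rel h'' => exact absurd (h'.trans h'') (lt_irrefl _)
          · exact absurd ((List.cons_eq_cons.mp heq2).1 ▸ h') (lt_irrefl _)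
      · rw [← heq]

theorem pv_str_prefix_between {p a s : String} (h₁ : p ≤ a) (h₂ : a ≤ s)
    (hp : p.toList <+: s.toList) : p.toList <+: a.toList :=
  pv_prefix_between (String.le_iff_toList_le.mp h₁) (String.le_iff_toList_le.mp h₂) hp

theorem pv_str_prefix_le {t s : String} (h : t.toList <+: s.toList) : t ≤ s :=
  String.le_iff_toList_le.mpr (pv_prefix_le h)

theorem pv_startswith_iff (s p : String) :
    PySem.Str.startswith s p = true ↔ p.toList <+: s.toList := by
  simp [PySem.Chars.startswith_iff]

theorem pvLoopA_mem (rest : List String) (p : String)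
    (hs : rest.Pairwise (· ≤ ·)) (hp : ∀ x ∈ rest, p ≤ x) (s : String) :
    s ∈ pvLoopA rest p ↔ s ∈ rest ∧ ¬ p.toList <+: s.toList ∧ pvMinIn rest s := by
  induction rest generalizing p with
  | nil => simp [pvLoopA, pvMinIn]
  | cons a tl ih =>
    rw [List.pairwise_cons] at hs
    have hpa : p ≤ a := hp a (List.mem_cons_self)
    by_cases h : PySem.Str.startswith a p = true
    · -- a is dropped: p is a prefix of a
      have hpfx : p.toList <+: a.toList := (pv_startswith_iff a p).mp h
      simp only [pvLoopA]
      rw [if_pos h, ih p hs.2 (fun x hx => hpa.trans (hs.1 x hx))]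
      constructor
      · rintro ⟨hmem, hnp, hmin⟩
        refine ⟨List.mem_cons_of_mem a hmem, hnp, ?_⟩
        intro t ht htne
        rcases List.mem_cons.mp ht with rfl | ht'
        · exact fun hc => hnp (hpfx.trans hc)
        · exact hmin t ht' htne
      · rintro ⟨hmem, hnp, hmin⟩
        have hsa : s ≠ a := by rintro rfl; exact hnp hpfx
        rcases List.mem_cons.mp hmem with rfl | hmem'
        · exact absurd rfl hsa
        · exact ⟨hmem', hnp, fun t ht => hmin t (List.mem_cons_of_mem a ht)⟩
    · -- a is kept, the tracked prefix becomes a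
      have hnpfx : ¬ p.toList <+: a.toList := fun hc => h ((pv_startswith_iff a p).mpr hc)
      simp only [pvLoopA]
      rw [if_neg h, List.mem_cons, ih a hs.2 hs.1]
      constructor
      · rintro (rfl | ⟨hmem, hna, hmin⟩)
        · refine ⟨List.mem_cons_self, hnpfx, ?_⟩
          intro t ht htne
          rcases List.mem_cons.mp ht with rfl | ht'
          · exact absurd rfl htne
          · exact fun hc => htne (le_antisymm (pv_str_prefix_le hc) (hs.1 t ht'))
        · refine ⟨List.mem_cons_of_mem a hmem, ?_, ?_⟩
          · exact fun hc => hnpfx (pv_str_prefix_between hpa (hs.1 s hmem) hc)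
          · intro t ht htne
            rcases List.mem_cons.mp ht with rfl | ht'
            · exact hna
            · exact hmin t ht' htne
      · rintro ⟨hmem, hnp, hmin⟩
        by_cases hsa : s = a
        · exact Or.inl hsa
        · have hmem' : s ∈ tl := by
            rcases List.mem_cons.mp hmem with rfl | hmem' <;>
              [exact absurd rfl hsa; exact hmem']
          exact Or.inr ⟨hmem', hmin a List.mem_cons_self (fun hc => hsa hc.symm),
            fun t ht => hmin t (List.mem_cons_of_mem a ht)⟩

theorem pvLoopA_pairwise (rest : List String) (p : String)
    (hs : rest.Pairwise (· ≤ ·)) (hp : ∀ x ∈ rest, p ≤ x) :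
    (pvLoopA rest p).Pairwise (· < ·) := by
  induction rest generalizing p with
  | nil => simp [pvLoopA]
  | cons a tl ih =>
    rw [List.pairwise_cons] at hs
    by_cases h : PySem.Str.startswith a p = true
    · simp only [pvLoopA]
      rw [if_pos h]
      exact ih p hs.2 (fun x hx => (hp a List.mem_cons_self).trans (hs.1 x hx))
    · simp only [pvLoopA]
      rw [if_neg h, List.pairwise_cons]
      refine ⟨?_, ih a hs.2 hs.1⟩
      intro s hmem
      have hchar := (pvLoopA_mem tl a hs.2 hs.1 s).mp hmem
      exact lt_of_le_of_ne (hs.1 s hchar.1)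
        (by rintro rfl; exact hchar.2.1 (List.prefix_refl _))

-- A's output, as head-plus-sweep over the sorted list
theorem pv_A_eq (aliases : List String) :
    reduce_aliases aliases =
      match PySem.List.sorted aliases (fun x => x) false with
      | [] => []
      | a :: tl => a :: pvLoopA tl a := by
  unfold reduce_aliases
  cases hL : PySem.List.sorted aliases (fun x => x) false with
  | nil => simp
  | cons a tl =>
    simp only [List.foldl_cons]
    have h1 : pvStepA ([], none) a = ([a], some a) := rfl
    rw [h1, pv_foldl_factor]
    simp

theorem pv_minIn_congr {xs ys : List String} (h : ∀ t, t ∈ xs ↔ t ∈ ys) (s : String) :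
    pvMinIn xs s ↔ pvMinIn ys s := by
  exact ⟨fun hm t ht => hm t ((h t).mpr ht), fun hm t ht => hm t ((h t).mp ht)⟩

theorem pv_A_mem (aliases : List String) (s : String) :
    s ∈ reduce_aliases aliases ↔ s ∈ aliases ∧ pvMinIn aliases s := by
  have hP : (PySem.List.sorted aliases (fun x => x) false).Pairwise (· ≤ ·) := by
    simpa using PySem.List.sorted_pairwise (xs := aliases) (key := fun x => x)
  have hmemL : ∀ t, t ∈ PySem.List.sorted aliases (fun x => x) false ↔ t ∈ aliases :=
    fun t => PySem.List.mem_sorted aliases (fun x => x) false t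
  rw [pv_A_eq]
  cases hL : PySem.List.sorted aliases (fun x => x) false with
  | nil =>
    rw [hL] at hmemL
    simp only [List.not_mem_nil, false_iff]
    rintro ⟨hmem, -⟩
    exact (List.not_mem_nil).elim ((hmemL s).mpr hmem)
  | cons a tl =>
    rw [hL] at hP hmemL
    rw [List.pairwise_cons] at hP
    have key : s ∈ a :: pvLoopA tl a ↔ s ∈ (a :: tl) ∧ pvMinIn (a :: tl) s := by
      rw [List.mem_cons, pvLoopA_mem tl a hP.2 hP.1]
      constructor
      · rintro (rfl | ⟨hmem, hna, hmin⟩)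
        · refine ⟨List.mem_cons_self, ?_⟩
          intro t ht htne
          rcases List.mem_cons.mp ht with rfl | ht'
          · exact absurd rfl htne
          · exact fun hc => htne (le_antisymm (pv_str_prefix_le hc) (hP.1 t ht'))
        · refine ⟨List.mem_cons_of_mem a hmem, ?_⟩
          intro t ht htne
          rcases List.mem_cons.mp ht with rfl | ht'
          · exact hna
          · exact hmin t ht' htne
      · rintro ⟨hmem, hmin⟩
        by_cases hsa : s = a
        · exact Or.inl hsa
        · have hmem' : s ∈ tl := by
            rcases List.mem_cons.mp hmem with rfl | hmem' <;>
              [exact absurd rfl hsa; exact hmem']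
          exact Or.inr ⟨hmem', hmin a List.mem_cons_self (fun hc => hsa hc.symm),
            fun t ht => hmin t (List.mem_cons_of_mem a ht)⟩
    rw [key]
    exact and_congr (hmemL s) (pv_minIn_congr hmemL s)

theorem pv_A_pairwise (aliases : List String) :
    (reduce_aliases aliases).Pairwise (· < ·) := by
  have hP : (PySem.List.sorted aliases (fun x => x) false).Pairwise (· ≤ ·) := by
    simpa using PySem.List.sorted_pairwise (xs := aliases) (key := fun x => x)
  rw [pv_A_eq]
  cases hL : PySem.List.sorted aliases (fun x => x) false with
  | nil => simp
  | cons a tl =>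
    rw [hL] at hP
    rw [List.pairwise_cons] at hP
    rw [List.pairwise_cons]
    refine ⟨?_, pvLoopA_pairwise tl a hP.2 hP.1⟩
    intro s hmem
    have hchar := (pvLoopA_mem tl a hP.2 hP.1 s).mp hmem
    exact lt_of_le_of_ne (hP.1 s hchar.1)
      (by rintro rfl; exact hchar.2.1 (List.prefix_refl _))

theorem pv_B_mem (aliases : List String) (s : String) :
    s ∈ reduce_aliases_alt aliases ↔ s ∈ aliases ∧ pvMinIn aliases s := by
  unfold reduce_aliases_alt
  rw [PySem.List.mem_sorted, List.mem_filter]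
  simp only [Bool.not_eq_eq_eq_not, Bool.not_true, List.any_eq_false, Bool.and_eq_false_iff,
    decide_eq_false_iff_not, not_not, Bool.not_eq_true, PySem.Set.mem_ofList]
  unfold pvMinIn
  constructor
  · rintro ⟨hmem, hall⟩
    refine ⟨hmem, ?_⟩
    intro t ht htne hc
    rcases hall t ht with h | h
    · exact htne h
    · exact absurd ((pv_startswith_iff s t).mpr hc) (by simpa using h)
  · rintro ⟨hmem, hmin⟩
    refine ⟨hmem, ?_⟩
    intro t ht
    by_cases hts : t = s
    · exact Or.inl hts
    · refine Or.inr ?_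
      rw [Bool.eq_false_iff]
      intro hc
      exact hmin t ht hts ((pv_startswith_iff s t).mp hc)

theorem pv_B_pairwise (aliases : List String) :
    (reduce_aliases_alt aliases).Pairwise (· < ·) := by
  unfold reduce_aliases_alt
  have hnd : ((PySem.Set.ofList aliases).filter
      (fun s => ! ((PySem.Set.ofList aliases).any
        (fun t => decide (t ≠ s) && PySem.Str.startswith s t)))).Nodup :=
    (PySem.Set.nodup_ofList aliases).filter _
  have hperm := PySem.List.sorted_perm (xs := (PySem.Set.ofList aliases).filter
      (fun s => ! ((PySem.Set.ofList aliases).any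
        (fun t => decide (t ≠ s) && PySem.Str.startswith s t))))
    (key := fun x => x) (rev := false)
  have hnd2 := hperm.nodup_iff.mpr hnd
  have hle : (PySem.List.sorted ((PySem.Set.ofList aliases).filter
      (fun s => ! ((PySem.Set.ofList aliases).any
        (fun t => decide (t ≠ s) && PySem.Str.startswith s t))))
      (fun x => x) false).Pairwise (· ≤ ·) := by
    simpa using PySem.List.sorted_pairwise (xs := (PySem.Set.ofList aliases).filter
      (fun s => ! ((PySem.Set.ofList aliases).any
        (fun t => decide (t ≠ s) && PySem.Str.startswith s t)))) (key := fun x => x)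
  exact (hle.and hnd2).imp (fun h => lt_of_le_of_ne h.1 h.2)

theorem pv_agree (aliases : List String) :
    reduce_aliases aliases = reduce_aliases_alt aliases := by
  have pA := pv_A_pairwise aliases
  have pB := pv_B_pairwise aliases
  have ndA : (reduce_aliases aliases).Nodup := pA.imp (fun h => ne_of_lt h)
  have ndB : (reduce_aliases_alt aliases).Nodup := pB.imp (fun h => ne_of_lt h)
  have hperm : (reduce_aliases aliases).Perm (reduce_aliases_alt aliases) :=
    (List.perm_ext_iff_of_nodup ndA ndB).mpr
      (fun s => by rw [pv_A_mem, pv_B_mem])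
  exact hperm.eq_of_pairwise (fun a b _ _ hab hba => le_antisymm hab hba)
    (pA.imp (fun h => le_of_lt h)) (pB.imp (fun h => le_of_lt h))

-- ===== VERDICT (by name: the statement is the Claim_ definition above) =====
theorem reduce_aliases_spec : Claim_equal_reduce_aliases := by
  intro aliases _
  unfold Spec_reduce_aliases
  exact pv_agree aliases
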